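-- pv_equiv track=rewrite | github.com/darthc9/mini_challenges | AoC/2018/day3/day_three_bst.py | calculate_requested_area_for_bst
-- ===== SOURCE A (Python) =====
-- def calculate_requested_area_for_bst(bst: list):
--     """ given an inorder traveral of the segment BST of a single column,
--         calculate the area in that column that is covered by more than 1 square """
--
--     last_segment = 0  # scan the column from index Y=0 upwards
--     sqaure_num = 0    # number of squares currently 'live' while scanning the column
--     area = 0          # the area covered by more than one claim in this column
--
--     for segment in bst:
--         segment_len = segment[0] - last_segment
--         last_segment = segment[0]
--         if sqaure_num > 1:
--             area += segment_len
--         sqaure_num += segment[1]   # segment[1] is positive if claim boundary is opening, negative if closing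
--
--     return area
-- ===== SOURCE B (Python) =====
-- def calculate_requested_area_for_bst(bst: list):
--     """ given an inorder traveral of the segment BST of a single column,
--         calculate the area in that column that is covered by more than 1 square """
--     # Area covered by >1 claim = sum over maximal runs where the live count
--     # exceeds 1 of (run end position - run start position).  We detect the
--     # runs by their threshold crossings and sum signed boundary positions;
--     # no adjacent-gap subtraction and no last-position state is kept.
--     count = 0
--     area = 0
--     for pos, delta in bst:
--         before = count > 1
--         count += delta
--         if before and not count > 1:
--             area += pos          # a >1-covered run ends at this boundary
--         elif count > 1 and not before:
--             area -= pos          # a >1-covered run starts at this boundary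
--     if bst and count > 1:
--         area += bst[-1][0]       # run still open at the last scanned boundary
--     return area
-- ===== Notes on version B (the rewrite author's own statement) =====
-- stated objective: alternative
-- what changed: Instead of accumulating per-segment gap lengths with a carried last-position, B detects the maximal runs where the live count exceeds 1 via threshold crossings and sums signed boundary positions (+end, -start, plus the last boundary if a run is still open), keeping no previous-position state.
import Mathlib
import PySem

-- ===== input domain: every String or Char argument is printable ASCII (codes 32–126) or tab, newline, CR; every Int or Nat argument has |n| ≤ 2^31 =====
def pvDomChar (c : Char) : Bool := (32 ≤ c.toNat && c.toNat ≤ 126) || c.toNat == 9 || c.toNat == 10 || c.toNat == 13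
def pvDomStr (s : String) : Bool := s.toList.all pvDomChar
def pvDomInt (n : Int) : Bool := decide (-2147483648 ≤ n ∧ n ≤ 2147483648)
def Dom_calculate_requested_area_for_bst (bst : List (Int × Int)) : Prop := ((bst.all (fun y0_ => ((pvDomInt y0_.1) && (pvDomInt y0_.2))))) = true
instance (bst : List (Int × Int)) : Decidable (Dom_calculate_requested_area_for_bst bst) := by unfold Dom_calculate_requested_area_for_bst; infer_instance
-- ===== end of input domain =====

-- B sums signed boundary positions at >1-threshold crossings (run ends minus run starts, plus an
-- open-run tail term) instead of A's per-segment gap accumulation; same O(n) cost, alternative algorithm.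

-- ===== PORT A =====
-- state = (last_segment, sqaure_num, area), exactly A's loop body in order
def pvStepA (st : Int × Int × Int) (segment : Int × Int) : Int × Int × Int :=
  let segment_len := segment.1 - st.1
  (segment.1, st.2.1 + segment.2, if st.2.1 > 1 then st.2.2 + segment_len else st.2.2)

def calculate_requested_area_for_bst (bst : List (Int × Int)) : Int :=
  (bst.foldl pvStepA (0, 0, 0)).2.2

-- ===== PORT B =====
-- state = (count, area); the crossing test and the two signed updates, in Source B's order
def pvStepB (st : Int × Int) (seg : Int × Int) : Int × Int :=
  let before := st.1 > 1
  let count := st.1 + seg.2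
  let area :=
    if before ∧ ¬ count > 1 then st.2 + seg.1
    else if count > 1 ∧ ¬ before then st.2 - seg.1
    else st.2
  (count, area)

def calculate_requested_area_for_bst_alt (bst : List (Int × Int)) : Int :=
  let st := bst.foldl pvStepB (0, 0)
  -- 'if bst and count > 1: area += bst[-1][0]' — bst[-1] on a nonempty list is its last element
  match bst.getLast? with
  | some lastSeg => if st.1 > 1 then st.2 + lastSeg.1 else st.2
  | none => st.2

-- ===== PRECONDITION & SPEC =====
def Spec_calculate_requested_area_for_bst (bst : List (Int × Int)) (out : Int) : Prop := out = calculate_requested_area_for_bst_alt bst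
instance (bst : List (Int × Int)) (out : Int) : Decidable (Spec_calculate_requested_area_for_bst bst out) := by unfold Spec_calculate_requested_area_for_bst; infer_instance

-- ===== CLAIM (what is proved, stated in full; the proofs are below) =====
def Claim_equal_calculate_requested_area_for_bst : Prop := ∀ (bst : List (Int × Int)), Dom_calculate_requested_area_for_bst bst → Spec_calculate_requested_area_for_bst bst (calculate_requested_area_for_bst bst)

-- ===== LEMMAS AND PROOFS =====

-- reference value: area contributed by `rest` when the previous boundary is `last`
-- and the current live count is `num`
def pvS (last num : Int) : List (Int × Int) → Int
  | [] => 0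
  | s :: rest => (if num > 1 then s.1 - last else 0) + pvS s.1 (num + s.2) rest

-- recursive characterisations of B's fold: final count and loop area
def pvBc (num : Int) : List (Int × Int) → Int
  | [] => num
  | s :: rest => pvBc (num + s.2) rest

def pvBa (num : Int) : List (Int × Int) → Int
  | [] => 0
  | s :: rest =>
      (if num > 1 ∧ ¬ num + s.2 > 1 then s.1
       else if num + s.2 > 1 ∧ ¬ num > 1 then -s.1 else 0) + pvBa (num + s.2) rest

theorem pvFoldA_eq_S (bst : List (Int × Int)) :
    ∀ (last num area : Int),
      (bst.foldl pvStepA (last, num, area)).2.2 = area + pvS last num bst := by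
  induction bst with
  | nil => intro last num area; simp [pvS]
  | cons s rest ih =>
      intro last num area
      simp only [List.foldl_cons, pvStepA, pvS, ih]
      split_ifs <;> ring

theorem pvFoldB_char (bst : List (Int × Int)) :
    ∀ (num area : Int),
      bst.foldl pvStepB (num, area) = (pvBc num bst, area + pvBa num bst) := by
  induction bst with
  | nil => intro num area; simp [pvBc, pvBa]
  | cons s rest ih =>
      intro num area
      simp only [List.foldl_cons, pvStepB, pvBc, pvBa, ih]
      refine Prod.ext rfl ?_
      simp only
      split_ifs <;> ring

theorem pvLastPos_cons {x : Int × Int} {rest : List (Int × Int)} {last : Int} :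
    (((x :: rest).getLast?).map Prod.fst).getD last
      = ((rest.getLast?).map Prod.fst).getD x.1 := by
  cases rest with
  | nil => rfl
  | cons y r =>
      rw [List.getLast?_cons_cons]
      cases h : (y :: r).getLast? with
      | none => simp at h
      | some z => simp

theorem pvS_eq_Ba (bst : List (Int × Int)) :
    ∀ (last num : Int),
      pvS last num bst
        = pvBa num bst
          + (if pvBc num bst > 1 then ((bst.getLast?).map Prod.fst).getD last else 0)
          - (if num > 1 then last else 0) := by
  induction bst with
  | nil => intro last num; simp [pvS, pvBa, pvBc]
  | cons s rest ih =>
      intro last num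
      rw [pvLastPos_cons]
      simp only [pvS, pvBa, pvBc, ih s.1 (num + s.2)]
      split_ifs <;> omega

-- ===== VERDICT (by name: the statement is the Claim_ definition above) =====
theorem calculate_requested_area_for_bst_spec : Claim_equal_calculate_requested_area_for_bst := by
  intro bst _
  show calculate_requested_area_for_bst bst = calculate_requested_area_for_bst_alt bst
  unfold calculate_requested_area_for_bst calculate_requested_area_for_bst_alt
  rw [pvFoldA_eq_S, pvS_eq_Ba, pvFoldB_char]
  cases hL : bst.getLast? with
  | none => simp
  | some lastSeg =>
      simp only [Option.map_some, Option.getD_some]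
      split_ifs <;> ring
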